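-- pv_equiv track=rewrite | github.com/avnikhandhar/databases-for-analytics | week-1/hw-1/assignment-1.py | check_primary_key_constraints
-- ===== SOURCE A (Python) =====
-- def check_primary_key_constraints(students):
--     seen_ids = set()
--
--     for student in students:
--         student_id = student.get("student_id")
--
--         if student_id in seen_ids:
--             return "The data do not follows the primary key constraints"
--
--         seen_ids.add(student_id)
--
--     return "The data follows the primary key constraints"
-- ===== SOURCE B (Python) =====
-- def check_primary_key_constraints(students):
--     ids = [student.get("student_id") for student in students]
--     if len(ids) == len(set(ids)):
--         return "The data follows the primary key constraints"
--     return "The data do not follows the primary key constraints"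
-- ===== Notes on version B (the rewrite author's own statement) =====
-- stated objective: simpler
-- what changed: Replaced the incremental seen-set loop with per-element membership test and early return by collecting all ids once and comparing len(ids) to len(set(ids)).
import Mathlib
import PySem

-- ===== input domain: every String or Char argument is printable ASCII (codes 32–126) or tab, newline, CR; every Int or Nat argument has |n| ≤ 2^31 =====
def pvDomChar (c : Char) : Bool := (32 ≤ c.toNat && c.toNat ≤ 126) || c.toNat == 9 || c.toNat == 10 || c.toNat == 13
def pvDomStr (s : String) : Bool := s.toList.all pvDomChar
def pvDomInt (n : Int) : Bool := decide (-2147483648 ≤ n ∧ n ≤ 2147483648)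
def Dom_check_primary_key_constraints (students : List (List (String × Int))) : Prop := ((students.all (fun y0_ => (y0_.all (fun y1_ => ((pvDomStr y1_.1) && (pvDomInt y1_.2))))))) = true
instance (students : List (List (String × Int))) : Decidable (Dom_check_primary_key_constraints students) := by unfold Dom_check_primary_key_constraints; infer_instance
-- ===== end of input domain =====

-- B replaces A's incremental seen-set loop (early return on first duplicate) by building the
-- id list once and comparing its length with the length of its set of distinct elements: simpler.


-- ===== PORT A =====
-- the for-loop with early return, carrying the growing seen_ids set
def pvA_loop (students : List (List (String × Int))) (seen : PySem.Set (Option Int)) : String :=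
  match students with
  | [] => "The data follows the primary key constraints"
  | student :: rest =>
    let student_id := List.lookup "student_id" student
    if PySem.Set.contains seen student_id then
      "The data do not follows the primary key constraints"
    else
      pvA_loop rest (PySem.Set.add seen student_id)

def check_primary_key_constraints (students : List (List (String × Int))) : String :=
  pvA_loop students PySem.Set.empty

-- ===== PORT B =====
def check_primary_key_constraints_alt (students : List (List (String × Int))) : String :=
  let ids := students.map (fun student => List.lookup "student_id" student)
  if ids.length = (PySem.Set.ofList ids).length then
    "The data follows the primary key constraints"
  else
    "The data do not follows the primary key constraints"

-- ===== PRECONDITION & SPEC =====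
def Spec_check_primary_key_constraints (students : List (List (String × Int))) (out : String) : Prop := out = check_primary_key_constraints_alt students
instance (students : List (List (String × Int))) (out : String) : Decidable (Spec_check_primary_key_constraints students out) := by unfold Spec_check_primary_key_constraints; infer_instance

-- ===== CLAIM (what is proved, stated in full; the proofs are below) =====
def Claim_equal_check_primary_key_constraints : Prop := ∀ (students : List (List (String × Int))), Dom_check_primary_key_constraints students → Spec_check_primary_key_constraints students (check_primary_key_constraints students)

-- ===== LEMMAS AND PROOFS =====

-- the loop returns "follows" exactly when the ids are pairwise distinct and disjoint from seen
theorem pvA_loop_eq (students : List (List (String × Int))) (seen : PySem.Set (Option Int)) :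
    pvA_loop students seen =
      (if (students.map (fun student => List.lookup "student_id" student)).Nodup ∧
          (∀ y ∈ students.map (fun student => List.lookup "student_id" student), y ∉ seen) then
        "The data follows the primary key constraints"
      else
        "The data do not follows the primary key constraints") := by
  induction students generalizing seen with
  | nil => simp [pvA_loop]
  | cons s rest ih =>
    simp only [pvA_loop]
    by_cases h : List.lookup "student_id" s ∈ seen
    · rw [if_pos, if_neg]
      · rintro ⟨-, hall⟩
        exact hall _ (by simp) h
      · simpa [PySem.Set.contains] using h
    · rw [if_neg (by simpa [PySem.Set.contains] using h), ih]
      refine if_congr ?_ rfl rfl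
      simp only [List.map_cons, List.nodup_cons, List.mem_cons, PySem.Set.mem_add]
      constructor
      · intro hR
        obtain ⟨hnd, hall⟩ := hR
        refine ⟨⟨fun hmem => hall _ hmem (Or.inr rfl), hnd⟩, ?_⟩
        rintro y (rfl | hy)
        · exact h
        · exact fun hy' => hall y hy (Or.inl hy')
      · intro hL
        obtain ⟨⟨hns, hnd⟩, hall⟩ := hL
        refine ⟨hnd, fun y hy => ?_⟩
        rintro (hy' | rfl)
        · exact hall y (Or.inr hy) hy'
        · exact hns hy

-- Nodup ↔ set(ids) has the same length as ids
theorem nodup_iff_ofList_length {α : Type} [BEq α] [LawfulBEq α] (xs : List α) :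
    xs.Nodup ↔ xs.length = (PySem.Set.ofList xs).length := by
  induction xs using List.reverseRecOn with
  | nil => simp [PySem.Set.ofList_nil]
  | append_singleton xs x ih =>
    rw [PySem.Set.ofList_append_singleton]
    by_cases h : x ∈ PySem.Set.ofList xs
    · have hx : x ∈ xs := (PySem.Set.mem_ofList _ _).1 h
      have hle : (PySem.Set.ofList xs).length ≤ xs.length := PySem.Set.length_ofList_le _
      have : PySem.Set.add (PySem.Set.ofList xs) x = PySem.Set.ofList xs := by
        simp [PySem.Set.add, PySem.Set.contains, h]
      rw [this]
      simp only [List.nodup_append, List.length_append]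
      constructor
      · rintro ⟨-, -, hdisj⟩
        exact absurd hx (by simpa using hdisj x hx)
      · intro hlen
        simp only [List.length_singleton] at hlen
        omega
    · have hx : x ∉ xs := fun hxx => h ((PySem.Set.mem_ofList _ _).2 hxx)
      have : PySem.Set.add (PySem.Set.ofList xs) x = PySem.Set.ofList xs ++ [x] := by
        simp [PySem.Set.add, PySem.Set.contains, h]
      rw [this]
      simp only [List.nodup_append, List.length_append, List.nodup_singleton]
      constructor
      · rintro ⟨hnd, -, -⟩
        have := ih.1 hnd; omega
      · intro hlen
        have : xs.length = (PySem.Set.ofList xs).length := by omega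
        exact ⟨ih.2 this, by simp, by simpa using fun a ha (h' : a = x) => hx (h' ▸ ha)⟩

-- ===== VERDICT (by name: the statement is the Claim_ definition above) =====
theorem check_primary_key_constraints_spec : Claim_equal_check_primary_key_constraints := by
  intro students _
  unfold Spec_check_primary_key_constraints check_primary_key_constraints check_primary_key_constraints_alt
  rw [pvA_loop_eq]
  refine if_congr ?_ rfl rfl
  rw [nodup_iff_ofList_length]
  simp [PySem.Set.empty]
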